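-- pv_equiv track=rewrite | github.com/sachinchandra/voxbridge | voxbridge/audio/codecs.py | _alaw_encode_sample
-- ===== SOURCE A (Python) =====
-- def _alaw_encode_sample(sample: int) -> int:
--     """Encode a single 16-bit PCM sample to A-law."""
--     sign = 0
--     if sample < 0:
--         sign = 0x80
--         sample = -sample
--     if sample > 32767:
--         sample = 32767
--
--     if sample >= 256:
--         exponent = 7
--         exp_mask = 0x4000
--         while exponent > 1 and not (sample & exp_mask):
--             exponent -= 1
--             exp_mask >>= 1
--         mantissa = (sample >> (exponent + 3)) & 0x0F
--         alaw_byte = sign | (exponent << 4) | mantissa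
--     else:
--         alaw_byte = sign | (sample >> 4)
--
--     return alaw_byte ^ 0x55
-- ===== SOURCE B (Python) =====
-- def _alaw_encode_sample(sample: int) -> int:
--     """Encode a single 16-bit PCM sample to A-law (closed-form exponent)."""
--     sign = 0x80 if sample < 0 else 0
--     mag = min(abs(sample), 32767)
--     if mag < 256:
--         return (sign | (mag >> 4)) ^ 0x55
--     exponent = mag.bit_length() - 8
--     mantissa = (mag >> (exponent + 3)) & 0x0F
--     return (sign | (exponent << 4) | mantissa) ^ 0x55
-- ===== Notes on version B (the rewrite author's own statement) =====
-- stated objective: idiomatic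
-- what changed: The while-loop that scans the mask bits for the segment exponent is replaced by a closed form computed from mag.bit_length(), and the sign/clamp prologue is folded into abs/min one-liners.
import Mathlib
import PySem

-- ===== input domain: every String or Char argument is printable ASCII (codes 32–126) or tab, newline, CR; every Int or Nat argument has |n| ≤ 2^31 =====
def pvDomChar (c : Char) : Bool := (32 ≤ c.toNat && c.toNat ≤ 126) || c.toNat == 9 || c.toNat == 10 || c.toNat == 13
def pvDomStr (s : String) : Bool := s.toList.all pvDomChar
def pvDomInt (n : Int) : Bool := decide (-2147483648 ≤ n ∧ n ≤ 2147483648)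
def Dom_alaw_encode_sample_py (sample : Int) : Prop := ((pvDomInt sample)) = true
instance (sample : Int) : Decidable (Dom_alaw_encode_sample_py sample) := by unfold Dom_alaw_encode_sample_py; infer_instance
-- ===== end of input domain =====

-- B replaces A's while-loop bit-scan for the exponent by the closed form bit_length(mag) - 8 (idiomatic/simpler).

-- ===== PORT A =====
-- the while-loop: 'while exponent > 1 and not (sample & exp_mask): exponent -= 1; exp_mask >>= 1'
def alawLoop (s : Nat) : Nat → Nat → Nat
  | e + 2, mask => if s &&& mask = 0 then alawLoop s (e + 1) (mask >>> 1) else e + 2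
  | e, _ => e

def alaw_encode_sample_py (sample : Int) : Int :=
  let sign : Nat := if sample < 0 then 0x80 else 0
  let s1 : Int := if sample < 0 then -sample else sample
  let s2 : Int := if s1 > 32767 then 32767 else s1
  let m : Nat := s2.toNat  -- s2 ≥ 0 here, so toNat is exact
  if 256 ≤ m then
    let exponent := alawLoop m 7 0x4000
    let mantissa := (m >>> (exponent + 3)) &&& 0x0F
    (((sign ||| (exponent <<< 4)) ||| mantissa) ^^^ 0x55 : Nat)
  else
    ((sign ||| (m >>> 4)) ^^^ 0x55 : Nat)

-- ===== PORT B =====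
-- Nat.size is Python's int.bit_length on nonnegative ints
def alaw_encode_sample_py_alt (sample : Int) : Int :=
  let sign : Nat := if sample < 0 then 0x80 else 0
  let mag : Nat := min sample.natAbs 32767
  if mag < 256 then
    ((sign ||| (mag >>> 4)) ^^^ 0x55 : Nat)
  else
    let exponent := Nat.size mag - 8
    let mantissa := (mag >>> (exponent + 3)) &&& 0x0F
    (((sign ||| (exponent <<< 4)) ||| mantissa) ^^^ 0x55 : Nat)

-- ===== PRECONDITION & SPEC =====
def Spec_alaw_encode_sample_py (sample : Int) (out : Int) : Prop := out = alaw_encode_sample_py_alt sample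
instance (sample : Int) (out : Int) : Decidable (Spec_alaw_encode_sample_py sample out) := by unfold Spec_alaw_encode_sample_py; infer_instance

-- ===== CLAIM (what is proved, stated in full; the proofs are below) =====
def Claim_equal_alaw_encode_sample_py : Prop := ∀ (sample : Int), Dom_alaw_encode_sample_py sample → Spec_alaw_encode_sample_py sample (alaw_encode_sample_py sample)

-- ===== LEMMAS AND PROOFS =====

lemma pvAnd_eq_zero (j m : Nat) (h : m < 2 ^ j) : m &&& 2 ^ j = 0 := by
  rw [Nat.and_two_pow, Nat.testBit_eq_false_of_lt h]
  simp

lemma pvAnd_ne_zero (j m : Nat) (hl : 2 ^ j ≤ m) (hu : m < 2 ^ (j + 1)) : m &&& 2 ^ j ≠ 0 := by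
  have hdiv : m / 2 ^ j = 1 := by
    apply Nat.div_eq_of_lt_le
    · simpa using hl
    · rw [pow_succ] at hu; omega
  have hbit : m.testBit j = true := by
    rw [Nat.testBit_eq_decide_div_mod_eq, hdiv]
    decide
  rw [Nat.and_two_pow, hbit]
  simp

-- the while-loop, started at exponent k with mask 2^(k+7), finds the top set bit e+7 of m
lemma pvLoop_gen (m : Nat) :
    ∀ k e : Nat, 1 ≤ e → e ≤ k → 2 ^ (e + 7) ≤ m → m < 2 ^ (e + 8) →
      alawLoop m k (2 ^ (k + 7)) = e := by
  intro k
  induction k with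
  | zero => intro e h1 h2 _ _; omega
  | succ k ih =>
    intro e h1 h2 hl hu
    by_cases he : e = k + 1
    · subst he
      match k with
      | 0 => rfl
      | k' + 1 =>
        show alawLoop m (k' + 2) (2 ^ (k' + 2 + 7)) = k' + 2
        rw [alawLoop]
        rw [if_neg (pvAnd_ne_zero (k' + 2 + 7) m (by simpa using hl) (by simpa using hu))]
    · have hek : e ≤ k := by omega
      match k with
      | 0 => omega
      | k' + 1 =>
        show alawLoop m (k' + 2) (2 ^ (k' + 2 + 7)) = e
        rw [alawLoop]
        have hz : m &&& 2 ^ (k' + 2 + 7) = 0 := by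
          apply pvAnd_eq_zero
          calc m < 2 ^ (e + 8) := hu
            _ ≤ 2 ^ (k' + 2 + 7) := Nat.pow_le_pow_right (by norm_num) (by omega)
        rw [if_pos hz, show (2 : Nat) ^ (k' + 2 + 7) >>> 1 = 2 ^ (k' + 1 + 7) by
          rw [Nat.shiftRight_succ, Nat.shiftRight_zero, pow_succ]
          exact Nat.mul_div_cancel _ (by norm_num)]
        exact ih e h1 hek hl hu

-- the loop agrees with the closed form bit_length - 8 on every clamped magnitude ≥ 256
lemma pvLoop_size (m : Nat) (h256 : 256 ≤ m) (h : m < 32768) :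
    alawLoop m 7 0x4000 = Nat.size m - 8 := by
  have hi9 : 9 ≤ Nat.size m := by
    have : 8 < Nat.size m := Nat.lt_size.mpr (by norm_num; omega)
    omega
  have hi15 : Nat.size m ≤ 15 := Nat.size_le.mpr (by norm_num; omega)
  have hl : 2 ^ (Nat.size m - 1) ≤ m := Nat.lt_size.mp (by omega)
  have hu : m < 2 ^ Nat.size m := Nat.lt_size_self m
  have := pvLoop_gen m 7 (Nat.size m - 8) (by omega) (by omega)
    (by rw [show Nat.size m - 8 + 7 = Nat.size m - 1 by omega]; exact hl)
    (by rw [show Nat.size m - 8 + 8 = Nat.size m by omega]; exact hu)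
  simpa using this

-- the magnitude-level bodies of the two ports
def pvBodyA (sign m : Nat) : Nat :=
  if 256 ≤ m then
    (((sign ||| (alawLoop m 7 0x4000 <<< 4)) ||| ((m >>> (alawLoop m 7 0x4000 + 3)) &&& 0x0F)) ^^^ 0x55)
  else ((sign ||| (m >>> 4)) ^^^ 0x55)

def pvBodyB (sign m : Nat) : Nat :=
  if m < 256 then ((sign ||| (m >>> 4)) ^^^ 0x55)
  else (((sign ||| ((Nat.size m - 8) <<< 4)) ||| ((m >>> ((Nat.size m - 8) + 3)) &&& 0x0F)) ^^^ 0x55)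

lemma pvBody_eq (sign m : Nat) (hm : m < 32768) : pvBodyA sign m = pvBodyB sign m := by
  unfold pvBodyA pvBodyB
  by_cases h : 256 ≤ m
  · rw [if_pos h, if_neg (by omega : ¬ m < 256), pvLoop_size m h hm]
  · rw [if_neg h, if_pos (by omega)]

-- lift the magnitude-level agreement through the Nat→Int casts of the two ports' bodies
lemma pvCast (sign M : Nat)
    (hb : pvBodyA sign M = pvBodyB sign M) :
    (if 256 ≤ M then
        ((((sign ||| (alawLoop M 7 0x4000 <<< 4)) ||| ((M >>> (alawLoop M 7 0x4000 + 3)) &&& 0x0F)) ^^^ 0x55 : Nat) : Int)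
      else (((sign ||| (M >>> 4)) ^^^ 0x55 : Nat) : Int)) =
    (if M < 256 then (((sign ||| (M >>> 4)) ^^^ 0x55 : Nat) : Int)
      else ((((sign ||| ((Nat.size M - 8) <<< 4)) ||| ((M >>> ((Nat.size M - 8) + 3)) &&& 0x0F)) ^^^ 0x55 : Nat) : Int)) := by
  unfold pvBodyA pvBodyB at hb
  by_cases h : 256 ≤ M
  · rw [if_pos h, if_neg (by omega : ¬ M < 256)]
    rw [if_pos h, if_neg (by omega : ¬ M < 256)] at hb
    exact_mod_cast hb
  · rw [if_neg h, if_pos (by omega)]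

theorem alaw_encode_sample_py_spec_aux (sample : Int) :
    alaw_encode_sample_py sample = alaw_encode_sample_py_alt sample := by
  simp only [alaw_encode_sample_py, alaw_encode_sample_py_alt]
  by_cases hs : sample < 0 <;> simp only [hs, if_true, if_false]
  · have hm : ((if (-sample : Int) > 32767 then 32767 else -sample).toNat) = min sample.natAbs 32767 := by
      split_ifs <;> omega
    rw [hm]
    exact pvCast 128 (min sample.natAbs 32767) (pvBody_eq 128 _ (by omega))
  · have hm : ((if (sample : Int) > 32767 then 32767 else sample).toNat) = min sample.natAbs 32767 := by
      split_ifs <;> omega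
    rw [hm]
    exact pvCast 0 (min sample.natAbs 32767) (pvBody_eq 0 _ (by omega))

-- ===== VERDICT (by name: the statement is the Claim_ definition above) =====
theorem alaw_encode_sample_py_spec : Claim_equal_alaw_encode_sample_py := by
  intro sample _
  exact alaw_encode_sample_py_spec_aux sample
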